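-- pv_equiv track=rewrite | github.com/BrettRey/erdos-problem-993 | conjecture_a_leaf_block_certificate.py | decode_subset
-- ===== SOURCE A (Python) =====
-- def decode_subset(mask: int, nodes: list[int]) -> list[int]:
--     out: list[int] = []
--     rem = mask
--     while rem:
--         lsb = rem & -rem
--         i = lsb.bit_length() - 1
--         rem ^= lsb
--         out.append(nodes[i])
--     return out
-- ===== SOURCE B (Python) =====
-- def decode_subset(mask: int, nodes: list[int]) -> list[int]:
--     return [nodes[i] for i in range(mask.bit_length()) if (mask >> i) & 1]
-- ===== Notes on version B (the rewrite author's own statement) =====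
-- stated objective: idiomatic
-- what changed: B scans every bit position 0..bit_length-1 with a shift-and-test comprehension instead of A's while-loop that repeatedly isolates and clears the lowest set bit with mask & -mask.
import Mathlib
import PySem

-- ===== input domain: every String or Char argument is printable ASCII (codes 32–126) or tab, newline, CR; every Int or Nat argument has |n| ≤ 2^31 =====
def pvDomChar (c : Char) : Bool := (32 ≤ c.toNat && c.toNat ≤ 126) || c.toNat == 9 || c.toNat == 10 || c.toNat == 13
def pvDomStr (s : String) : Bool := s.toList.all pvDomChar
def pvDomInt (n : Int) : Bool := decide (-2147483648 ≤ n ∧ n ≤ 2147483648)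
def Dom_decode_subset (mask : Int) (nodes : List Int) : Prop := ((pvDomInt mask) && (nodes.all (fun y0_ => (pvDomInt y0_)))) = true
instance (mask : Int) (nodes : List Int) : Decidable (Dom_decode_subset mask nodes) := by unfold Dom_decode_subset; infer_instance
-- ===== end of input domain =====

-- B replaces A's lowest-set-bit extraction loop (mask & -mask) by an idiomatic positional
-- scan of all bit positions below mask.bit_length(); equivalence is proved on Pre_ (the
-- inputs where the Python A returns at all).

-- ===== PORT A =====
-- 'while rem:' is a fueled recursion; mask.toNat fuel suffices on Pre_ (one iteration per
-- set bit).  nodes[i] is pyGet?; inside Pre_ it is always `some`, the `.getD 0` default is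
-- unreachable.  lsb.bit_length() - 1 is PySem.Int.bitLength (Python-exact) minus 1.
def decodeLoopA (fuel : Nat) (rem : Int) (nodes : List Int) (out : List Int) : List Int :=
  match fuel with
  | 0 => out
  | fuel + 1 =>
    if rem = 0 then out
    else
      let lsb := PySem.Int.band rem (-rem)
      let i := PySem.Int.bitLength lsb - 1
      let rem' := PySem.Int.bxor rem lsb
      decodeLoopA fuel rem' nodes (out ++ [(PySem.List.pyGet? nodes (i : Int)).getD 0])

def decode_subset (mask : Int) (nodes : List Int) : List Int :=
  decodeLoopA mask.toNat mask nodes []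

-- ===== PORT B =====
-- Source B: [nodes[i] for i in range(mask.bit_length()) if (mask >> i) & 1]
def decode_subset_alt (mask : Int) (nodes : List Int) : List Int :=
  (List.range (PySem.Int.bitLength mask)).filterMap (fun (i : Nat) =>
    if PySem.Int.band (mask >>> i) 1 ≠ 0 then
      some ((PySem.List.pyGet? nodes (i : Int)).getD 0)
    else none)

-- ===== PRECONDITION & SPEC =====
-- Pre_ is exactly where the Python A returns: negative masks make A's while-loop run
-- forever, and a mask with a set bit at index ≥ len(nodes) makes A raise IndexError
-- (B raises the same IndexError there).
def Pre_decode_subset (mask : Int) (nodes : List Int) : Prop :=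
  0 ≤ mask ∧ mask < 2 ^ nodes.length
instance (mask : Int) (nodes : List Int) : Decidable (Pre_decode_subset mask nodes) := by
  unfold Pre_decode_subset; infer_instance

def pvWitness_decode_subset : Int × List Int := (5, [10, 20, 30])

def Spec_decode_subset (mask : Int) (nodes : List Int) (out : List Int) : Prop :=
  out = decode_subset_alt mask nodes
instance (mask : Int) (nodes : List Int) (out : List Int) : Decidable (Spec_decode_subset mask nodes out) := by
  unfold Spec_decode_subset; infer_instance

-- ===== CLAIM (what is proved, stated in full; the proofs are below) =====
def Claim_equal_decode_subset : Prop := ∀ (mask : Int) (nodes : List Int),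
  Dom_decode_subset mask nodes → Pre_decode_subset mask nodes →
  Spec_decode_subset mask nodes (decode_subset mask nodes)

-- ===== LEMMAS AND PROOFS =====

-- the element appended for bit index i
def pvLook (nodes : List Int) (i : Nat) : Int := (PySem.List.pyGet? nodes (i : Int)).getD 0

-- set-bit positions of a natural number, in increasing order
def bitsOf (m : Nat) : List Nat :=
  if h : m = 0 then []
  else (if m % 2 = 1 then [0] else []) ++ (bitsOf (m / 2)).map (· + 1)
decreasing_by exact Nat.div_lt_self (Nat.pos_of_ne_zero h) one_lt_two

theorem bitsOf_zero : bitsOf 0 = [] := by unfold bitsOf; simp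

theorem bitsOf_pos (m : Nat) (h : m ≠ 0) :
    bitsOf m = (if m % 2 = 1 then [0] else []) ++ (bitsOf (m / 2)).map (· + 1) := by
  rw [bitsOf]; simp [h]

theorem decodeLoopA_zero (fuel : Nat) (nodes : List Int) (out : List Int) :
    decodeLoopA fuel 0 nodes out = out := by
  cases fuel <;> simp [decodeLoopA]

theorem and_odd (m : Nat) (hm : m % 2 = 1) : m &&& (m - 1) = m - 1 := by
  apply Nat.eq_of_testBit_eq
  intro k
  cases k with
  | zero =>
    rw [Nat.testBit_and, Nat.testBit_zero, Nat.testBit_zero]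
    have h1 : (m - 1) % 2 = 0 := by omega
    simp [h1]
  | succ k =>
    rw [Nat.testBit_and]
    simp only [Nat.testBit_succ]
    rw [show (m - 1) / 2 = m / 2 by omega]
    cases (m / 2).testBit k <;> simp

theorem and_two_mul (N : Nat) (hN : 0 < N) :
    (2 * N) &&& (2 * N - 1) = 2 * (N &&& (N - 1)) := by
  apply Nat.eq_of_testBit_eq
  intro k
  cases k with
  | zero =>
    rw [Nat.testBit_and, Nat.testBit_zero, Nat.testBit_zero, Nat.testBit_zero]
    have h1 : (2 * N) % 2 = 0 := by omega
    have h2 : (2 * (N &&& (N - 1))) % 2 = 0 := by omega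
    simp [h1, h2]
  | succ k =>
    rw [Nat.testBit_and]
    simp only [Nat.testBit_succ]
    rw [show 2 * N / 2 = N by omega, show (2 * N - 1) / 2 = N - 1 by omega,
      show 2 * (N &&& (N - 1)) / 2 = N &&& (N - 1) by omega, Nat.testBit_and]

theorem and_pred_eq (s : Nat) : ∀ m : Nat, m % 2 = 1 →
    (2 ^ s * m) &&& (2 ^ s * m - 1) = 2 ^ s * (m - 1) := by
  induction s with
  | zero => intro m hm; rw [pow_zero, one_mul, one_mul]; exact and_odd m hm
  | succ s ih =>
    intro m hm
    have hN : 0 < 2 ^ s * m := Nat.mul_pos (Nat.two_pow_pos s) (by omega)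
    rw [show 2 ^ (s + 1) * m = 2 * (2 ^ s * m) by ring,
      and_two_mul _ hN, ih m hm,
      show 2 * (2 ^ s * (m - 1)) = 2 ^ (s + 1) * (m - 1) by ring]

theorem xor_odd (m : Nat) (hm : m % 2 = 1) : m ^^^ 1 = m - 1 := by
  apply Nat.eq_of_testBit_eq
  intro k
  cases k with
  | zero =>
    rw [Nat.testBit_xor, Nat.testBit_zero, Nat.testBit_zero, Nat.testBit_zero]
    have h1 : (m - 1) % 2 = 0 := by omega
    simp [hm, h1]
  | succ k =>
    rw [Nat.testBit_xor]
    simp only [Nat.testBit_succ]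
    rw [show (1 : Nat) / 2 = 0 by omega, Nat.zero_testBit,
      show (m - 1) / 2 = m / 2 by omega]
    cases (m / 2).testBit k <;> simp

theorem xor_two_mul (a b : Nat) : (2 * a) ^^^ (2 * b) = 2 * (a ^^^ b) := by
  apply Nat.eq_of_testBit_eq
  intro k
  cases k with
  | zero =>
    rw [Nat.testBit_xor, Nat.testBit_zero, Nat.testBit_zero, Nat.testBit_zero]
    have h1 : (2 * a) % 2 = 0 := by omega
    have h2 : (2 * b) % 2 = 0 := by omega
    have h3 : (2 * (a ^^^ b)) % 2 = 0 := by omega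
    simp [h1, h2, h3]
  | succ k =>
    rw [Nat.testBit_xor]
    simp only [Nat.testBit_succ]
    rw [show 2 * a / 2 = a by omega, show 2 * b / 2 = b by omega,
      show 2 * (a ^^^ b) / 2 = a ^^^ b by omega, Nat.testBit_xor]

theorem xor_lsb_eq (s : Nat) : ∀ m : Nat, m % 2 = 1 →
    (2 ^ s * m) ^^^ (2 ^ s) = 2 ^ s * (m - 1) := by
  induction s with
  | zero => intro m hm; rw [pow_zero, one_mul, one_mul]; exact xor_odd m hm
  | succ s ih =>
    intro m hm
    rw [show 2 ^ (s + 1) * m = 2 * (2 ^ s * m) by ring,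
      show (2 : Nat) ^ (s + 1) = 2 * 2 ^ s by ring,
      xor_two_mul, ih m hm]
    ring

theorem band_neg_self (M : Nat) (h : 0 < M) :
    PySem.Int.band ((M : Nat) : Int) (-((M : Nat) : Int)) = ((M - (M &&& (M - 1)) : Nat) : Int) := by
  have hpos : (0 : Int) < (M : Int) := by exact_mod_cast h
  simp only [PySem.Int.band]
  rw [if_pos (by omega), if_neg (by omega)]
  have h1 : (-(-((M : Int))) - 1).toNat = M - 1 := by omega
  have h2 : ((M : Int)).toNat = M := by omega
  rw [h1, h2]

theorem bitLength_pow (s : Nat) : PySem.Int.bitLength ((2 ^ s : Nat) : Int) = s + 1 := by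
  have h1 := PySem.Int.lt_two_pow_bitLength ((2 ^ s : Nat) : Int)
  have h2 := PySem.Int.two_pow_bitLength_le ((2 ^ s : Nat) : Int)
    (by exact_mod_cast (Nat.two_pow_pos s).ne')
  rw [Int.natAbs_natCast] at h1 h2
  have h3 : s < PySem.Int.bitLength ((2 ^ s : Nat) : Int) :=
    (Nat.pow_lt_pow_iff_right (by norm_num)).mp h1
  have h4 : PySem.Int.bitLength ((2 ^ s : Nat) : Int) - 1 ≤ s :=
    (Nat.pow_le_pow_iff_right (by norm_num)).mp h2
  omega

-- A's loop emits the set-bit positions in increasing order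
theorem loopA_eq (m : Nat) : ∀ (s fuel : Nat) (nodes : List Int) (out : List Int),
    m ≤ fuel →
    decodeLoopA fuel (((2 ^ s * m : Nat) : Int)) nodes out =
      out ++ (bitsOf m).map (fun j => pvLook nodes (j + s)) := by
  induction m using Nat.strong_induction_on with
  | _ m ih =>
    intro s fuel nodes out hfuel
    by_cases h0 : m = 0
    · subst h0
      rw [mul_zero, bitsOf_zero]
      simpa using decodeLoopA_zero fuel nodes out
    · by_cases he : m % 2 = 1
      · -- odd m: one loop iteration removes bit s
        have hMpos : 0 < 2 ^ s * m := Nat.mul_pos (Nat.two_pow_pos s) (by omega)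
        obtain ⟨f, rfl⟩ : ∃ f, fuel = f + 1 := ⟨fuel - 1, by omega⟩
        have hne : ((2 ^ s * m : Nat) : Int) ≠ 0 := by exact_mod_cast hMpos.ne'
        simp only [decodeLoopA]
        rw [if_neg hne, band_neg_self _ hMpos, and_pred_eq s m he,
          show 2 ^ s * m - 2 ^ s * (m - 1) = 2 ^ s by
            rw [← Nat.mul_sub, show m - (m - 1) = 1 by omega, mul_one],
          bitLength_pow, Nat.add_sub_cancel, PySem.Int.bxor_natCast,
          xor_lsb_eq s m he,
          show 2 ^ s * (m - 1) = 2 ^ (s + 1) * (m / 2) by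
            rw [pow_succ, mul_comm (2 ^ s) 2, mul_assoc,
              show m - 1 = 2 * (m / 2) by omega]; ring,
          ih (m / 2) (Nat.div_lt_self (by omega) one_lt_two) (s + 1) f nodes _ (by omega),
          bitsOf_pos m h0, if_pos he]
        simp only [List.map_map, List.append_assoc, List.map_cons, List.cons_append,
          List.nil_append]
        rw [show (0 : Nat) + s = s by omega]
        have harg : ((fun j => pvLook nodes (j + s)) ∘ (· + 1)) = fun j => pvLook nodes (j + (s + 1)) := by
          funext j; simp [Function.comp]; congr 1; omega
        rw [harg]
        simp [pvLook]
      · -- even m: same remainder, indices shift by one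
        have hm2 : m = 2 * (m / 2) := by omega
        have heq : 2 ^ s * m = 2 ^ (s + 1) * (m / 2) := by
          conv_lhs => rw [hm2]
          ring
        rw [heq,
          ih (m / 2) (Nat.div_lt_self (by omega) one_lt_two) (s + 1) fuel nodes out (by omega),
          bitsOf_pos m h0, if_neg he]
        simp only [List.map_map, List.nil_append]
        have harg : ((fun j => pvLook nodes (j + s)) ∘ (· + 1)) = fun j => pvLook nodes (j + (s + 1)) := by
          funext j; simp [Function.comp]; congr 1; omega
        rw [harg]

theorem range_filter_testBit (K : Nat) : ∀ n : Nat, n < 2 ^ K →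
    (List.range K).filter (fun i => n.testBit i) = bitsOf n := by
  induction K with
  | zero =>
    intro n h
    have : n = 0 := by simpa using h
    subst this
    simp [bitsOf_zero]
  | succ K ih =>
    intro n h
    by_cases h0 : n = 0
    · subst h0; simp [Nat.zero_testBit, bitsOf_zero]
    · rw [List.range_succ_eq_map, List.filter_cons,
        show List.map Nat.succ (List.range K) = List.map (· + 1) (List.range K) from rfl,
        List.filter_map,
        show ((fun i => n.testBit i) ∘ (· + 1)) = fun i => (n / 2).testBit i from by
          funext i; simp [Function.comp, Nat.testBit_succ],
        ih (n / 2) (by rw [pow_succ] at h; omega),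
        bitsOf_pos n h0]
      by_cases hodd : n % 2 = 1 <;> simp [Nat.testBit_zero, hodd]

theorem filterMap_if {α β : Type} (P : α → Prop) [DecidablePred P] (f : α → β) (l : List α) :
    l.filterMap (fun a => if P a then some (f a) else none) =
      (l.filter (fun a => decide (P a))).map f := by
  induction l with
  | nil => simp
  | cons x xs ih => by_cases h : P x <;> simp [h, ih]

theorem shift_band_testBit (M i : Nat) :
    (PySem.Int.band (((M : Nat) : Int) >>> i) 1 ≠ 0) ↔ M.testBit i := by
  have hsh : (((M : Nat) : Int) >>> i) = ((M >>> i : Nat) : Int) :=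
    (Int.natCast_shiftRight M i).symm
  rw [hsh, show (1 : Int) = ((1 : Nat) : Int) from rfl, PySem.Int.band_natCast,
    Nat.and_one_is_mod]
  simp [Nat.testBit, Nat.one_and_eq_mod_two]
  omega

-- ===== VERDICT (by name: the statement is the Claim_ definition above) =====
theorem decode_subset_spec : Claim_equal_decode_subset := by
  intro mask nodes _ hpre
  obtain ⟨hge, _⟩ := hpre
  unfold Spec_decode_subset decode_subset decode_subset_alt
  have hmask : mask = ((mask.toNat : Nat) : Int) := by omega
  rw [hmask]
  set M := mask.toNat with hM
  rw [Int.toNat_natCast]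
  have hA := loopA_eq M 0 M nodes [] (le_refl M)
  rw [pow_zero, one_mul] at hA
  rw [hA, filterMap_if,
    show (fun i : Nat => decide (PySem.Int.band (((M : Nat) : Int) >>> i) 1 ≠ 0)) = fun i : Nat => M.testBit i from by
      funext i
      have hiff := shift_band_testBit M i
      by_cases h : M.testBit i <;> simp [h]
      · exact hiff.mpr h
      · by_contra hc; exact h (hiff.mp hc),
    range_filter_testBit _ M (by simpa using PySem.Int.lt_two_pow_bitLength ((M : Nat) : Int))]
  simp [pvLook]
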